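-- pv_equiv track=rewrite | github.com/canonical/certification-errbot | plugins/certification/jira_api.py | is_review_status
-- ===== SOURCE A (Python) =====
-- def is_review_status(status_name: str) -> bool:
--     """
--     Determine if a Jira status indicates the issue is in review.
--     Common review status names include variations of "review", "pending", etc.
--     """
--     if not status_name:
--         return False
--
--     status_lower = status_name.lower()
--     review_keywords = [
--         "review", "reviewing", "in review", "under review", "code review",
--         "pending review", "waiting for review", "ready for review",
--         "peer review", "technical review", "design review"
--     ]
--
--     return any(keyword in status_lower for keyword in review_keywords)
-- ===== SOURCE B (Python) =====
-- def is_review_status(status_name: str) -> bool: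
--     """Every keyword A scans for contains the substring "review", so one
--     membership test on the lowercased name is equivalent."""
--     return "review" in status_name.lower()
-- ===== Notes on version B (the rewrite author's own statement) =====
-- stated objective: simpler
-- what changed: The 11-keyword list and the any() scan are removed: since every keyword contains the substring "review", B is a single substring test on the lowercased name (the empty-string guard is also subsumed).
import Mathlib
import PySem

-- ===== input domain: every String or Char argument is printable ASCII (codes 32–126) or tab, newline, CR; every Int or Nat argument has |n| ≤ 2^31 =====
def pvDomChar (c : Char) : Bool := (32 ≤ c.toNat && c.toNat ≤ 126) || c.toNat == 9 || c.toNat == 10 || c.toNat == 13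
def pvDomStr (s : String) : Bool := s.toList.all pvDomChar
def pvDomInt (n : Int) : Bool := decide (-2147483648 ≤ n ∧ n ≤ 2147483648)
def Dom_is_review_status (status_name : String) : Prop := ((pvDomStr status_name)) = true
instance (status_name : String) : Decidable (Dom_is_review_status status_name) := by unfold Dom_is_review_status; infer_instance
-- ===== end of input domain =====

-- B replaces the 11-keyword any() scan by one substring test "review" in lower(s) (every keyword contains "review"): simpler.


-- ===== PORT A =====
def is_review_status (status_name : String) : Bool :=
  if status_name = "" then false
  else
    let status_lower := PySem.Str.lower status_name
    let review_keywords : List String :=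
      ["review", "reviewing", "in review", "under review", "code review",
       "pending review", "waiting for review", "ready for review",
       "peer review", "technical review", "design review"]
    review_keywords.any (fun keyword => PySem.Str.isIn keyword status_lower)

-- ===== PORT B =====
def is_review_status_alt (status_name : String) : Bool :=
  PySem.Str.isIn "review" (PySem.Str.lower status_name)

-- ===== PRECONDITION & SPEC =====
def Spec_is_review_status (status_name : String) (out : Bool) : Prop := out = is_review_status_alt status_name
instance (status_name : String) (out : Bool) : Decidable (Spec_is_review_status status_name out) := by unfold Spec_is_review_status; infer_instance

-- ===== CLAIM (what is proved, stated in full; the proofs are below) =====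
def Claim_equal_is_review_status : Prop := ∀ (status_name : String), Dom_is_review_status status_name → Spec_is_review_status status_name (is_review_status status_name)

-- ===== LEMMAS AND PROOFS =====

-- every keyword of A's list has "review" as an infix of its character list
theorem review_infix_keyword (k : String)
    (hk : k ∈ (["review", "reviewing", "in review", "under review", "code review",
       "pending review", "waiting for review", "ready for review",
       "peer review", "technical review", "design review"] : List String)) :
    "review".toList <:+: k.toList := by
  fin_cases hk <;> decide

-- ===== VERDICT (by name: the statement is the Claim_ definition above) =====
theorem is_review_status_spec : Claim_equal_is_review_status := by
  intro s _
  unfold Spec_is_review_status is_review_status is_review_status_alt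
  by_cases h : s = ""
  · subst h; decide
  · simp only [h, if_false]
    rw [Bool.eq_iff_iff]
    simp only [List.any_eq_true, PySem.Str.isIn_iff_infix]
    constructor
    · rintro ⟨k, hk, hinf⟩
      exact (review_infix_keyword k hk).trans hinf
    · intro hinf
      exact ⟨"review", by simp, hinf⟩
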